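-- pv_equiv track=rewrite | github.com/AILAB-CEFET-RJ/nerdd | src/tools/retrieve_similar_train_annotation_cases.py | _has_degenerate_merged_span
-- ===== SOURCE A (Python) =====
-- def _tokenize(text: str) -> list[str]:
--     return [tok for tok in str(text).strip().lower().split() if tok]
--
-- def _has_degenerate_merged_span(seeds: list[dict]) -> bool:
--     texts = [str(ent.get("text", "")).strip() for ent in seeds if str(ent.get("text", "")).strip()]
--     normalized = {_text.lower(): _text for _text in texts}
--     token_sets = {text.lower(): set(_tokenize(text)) for text in texts}
--     for text in texts:
--         toks = _tokenize(text)
--         if len(toks) < 2: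
--             continue
--         token_set = set(toks)
--         for other in texts:
--             if text == other:
--                 continue
--             other_toks = _tokenize(other)
--             if len(other_toks) != 1:
--                 continue
--             if set(other_toks).issubset(token_set):
--                 return True
--     return False
-- ===== SOURCE B (Python) =====
-- def _tokenize(text: str) -> list[str]:
--     return [tok for tok in str(text).strip().lower().split() if tok]
--
-- def _has_degenerate_merged_span(seeds: list[dict]) -> bool:
--     singles = set()
--     multi = set()
--     for ent in seeds:
--         toks = _tokenize(str(ent.get("text", "")))
--         if len(toks) == 1:
--             singles.add(toks[0])
--         elif toks:
--             multi.update(toks)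
--     return not singles.isdisjoint(multi)
-- ===== Notes on version B (the rewrite author's own statement) =====
-- stated objective: simpler
-- what changed: Replaces the nested all-pairs re-scan of the texts by a single pass over seeds that builds the set of single-token words and the set of tokens of multi-token texts, answering with one disjointness test (a subset test against a singleton collapses to membership).
import Mathlib
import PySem

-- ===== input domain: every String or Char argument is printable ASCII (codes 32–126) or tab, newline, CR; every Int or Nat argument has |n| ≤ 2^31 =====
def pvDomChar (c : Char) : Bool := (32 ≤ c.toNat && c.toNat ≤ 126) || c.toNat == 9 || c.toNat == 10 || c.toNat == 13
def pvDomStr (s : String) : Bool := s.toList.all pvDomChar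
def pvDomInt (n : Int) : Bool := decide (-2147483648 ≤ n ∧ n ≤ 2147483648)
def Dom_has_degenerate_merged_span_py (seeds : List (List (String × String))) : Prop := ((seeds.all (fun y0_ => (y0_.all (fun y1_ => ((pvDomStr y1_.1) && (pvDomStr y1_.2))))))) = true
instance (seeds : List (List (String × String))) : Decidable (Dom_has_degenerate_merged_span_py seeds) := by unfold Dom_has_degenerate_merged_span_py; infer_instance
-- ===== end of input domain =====

-- B replaces A's nested all-pairs re-scan of the texts by a single pass over the seeds
-- that collects the single-token words and the tokens of multi-token texts into two
-- sets and tests their disjointness (objective: a simpler one-pass algorithm, same result).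

-- ===== PORT A =====
-- shared helper: Python _tokenize (Source A and Source B define it verbatim)
def pvTok (text : String) : List String :=
  (PySem.Str.split₀ (PySem.Str.lower (PySem.Str.strip text))).filter (fun tok => tok ≠ "")

-- str(ent.get("text", "")).strip()
def pvText (ent : List (String × String)) : String :=
  PySem.Str.strip ((PySem.Dict.mk ent).getD "text" "")

-- A's first comprehension: [str(ent.get("text","")).strip() for ent in seeds if str(...).strip()]
def pvTexts (seeds : List (List (String × String))) : List String :=
  seeds.foldl (fun acc ent =>
    let t := pvText ent
    if t ≠ "" then acc ++ [t] else acc) []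

def has_degenerate_merged_span_py (seeds : List (List (String × String))) : Bool :=
  let texts := pvTexts seeds
  let _normalized : PySem.Dict String String :=
      texts.foldl (fun d t => d.insert (PySem.Str.lower t) t) PySem.Dict.empty
  let _token_sets : PySem.Dict String (PySem.Set String) :=
      texts.foldl (fun d t => d.insert (PySem.Str.lower t) (PySem.Set.ofList (pvTok t))) PySem.Dict.empty
  texts.any (fun text =>
    let toks := pvTok text
    if toks.length < 2 then false
    else
      let token_set := PySem.Set.ofList toks
      texts.any (fun other =>
        if text == other then false
        else
          let other_toks := pvTok other
          if other_toks.length ≠ 1 then false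
          else PySem.Set.issubset (PySem.Set.ofList other_toks) token_set))

-- ===== PORT B =====
-- _tokenize(str(ent.get("text", "")))
def pvEntTok (ent : List (String × String)) : List String :=
  pvTok ((PySem.Dict.mk ent).getD "text" "")

-- Source B's loop body: update the (singles, multi) pair with one entry's tokens
def pvStepB (p : PySem.Set String × PySem.Set String) (ent : List (String × String)) :
    PySem.Set String × PySem.Set String :=
  let toks := pvEntTok ent
  if toks.length == 1 then (PySem.Set.add p.1 (toks.headD ""), p.2)
  else if !toks.isEmpty then (p.1, PySem.Set.update p.2 toks)
  else p

def has_degenerate_merged_span_py_alt (seeds : List (List (String × String))) : Bool :=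
  let p := seeds.foldl pvStepB (PySem.Set.empty, PySem.Set.empty)
  !(PySem.Set.isdisjoint p.1 p.2)

-- ===== PRECONDITION & SPEC =====
def Spec_has_degenerate_merged_span_py (seeds : List (List (String × String))) (out : Bool) : Prop := out = has_degenerate_merged_span_py_alt seeds
instance (seeds : List (List (String × String))) (out : Bool) : Decidable (Spec_has_degenerate_merged_span_py seeds out) := by unfold Spec_has_degenerate_merged_span_py; infer_instance

-- ===== CLAIM (what is proved, stated in full; the proofs are below) =====
def Claim_equal_has_degenerate_merged_span_py : Prop := ∀ (seeds : List (List (String × String))), Dom_has_degenerate_merged_span_py seeds → Spec_has_degenerate_merged_span_py seeds (has_degenerate_merged_span_py seeds)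

-- ===== LEMMAS AND PROOFS =====

-- dropWhile is idempotent
theorem pv_dropWhile_idem (p : Char → Bool) (l : List Char) :
    List.dropWhile p (List.dropWhile p l) = List.dropWhile p l := by
  induction l with
  | nil => simp
  | cons a l ih =>
    by_cases h : p a
    · simpa [h] using ih
    · simp [h]

-- a prefix of a dropWhile-fixed list is dropWhile-fixed
theorem pv_dropWhile_prefix (p : Char → Bool) {l u : List Char}
    (hl : List.dropWhile p l = l) (hu : u <+: l) : List.dropWhile p u = u := by
  cases u with
  | nil => simp
  | cons a u' =>
    have hpa : p a = false := by
      rcases hu with ⟨t, ht⟩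
      subst ht
      by_contra h
      have hpt : p a = true := by simpa using h
      have hl2 : List.dropWhile p (u' ++ t) = a :: (u' ++ t) := by
        simpa [hpt] using hl
      have hlen := congrArg List.length hl2
      have hle := List.length_dropWhile_le p (u' ++ t)
      simp at hlen
      have hlen2 : (u' ++ t).length = u'.length + t.length := by simp
      omega
    simp [hpa]

theorem pv_chars_strip_strip (l : List Char) :
    PySem.Chars.strip (PySem.Chars.strip l) = PySem.Chars.strip l := by
  unfold PySem.Chars.strip PySem.Chars.rstrip PySem.Chars.lstrip
  set p := PySem.Chars.isspace
  set t := List.dropWhile p l with ht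
  have h1 : List.dropWhile p t = t := by rw [ht]; exact pv_dropWhile_idem p l
  have hpre : (List.dropWhile p t.reverse).reverse <+: t := by
    have h2 : List.dropWhile p t.reverse <:+ t.reverse := List.dropWhile_suffix p
    have h3 := List.reverse_prefix.mpr (by simpa using h2)
    simpa using h3
  have h2 : List.dropWhile p ((List.dropWhile p t.reverse).reverse) =
      (List.dropWhile p t.reverse).reverse := pv_dropWhile_prefix p h1 hpre
  rw [h2, List.reverse_reverse, pv_dropWhile_idem]

theorem pv_str_strip_strip (s : String) :
    PySem.Str.strip (PySem.Str.strip s) = PySem.Str.strip s := by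
  apply String.ext
  rw [PySem.Str.toList_strip, PySem.Str.toList_strip, pv_chars_strip_strip]

theorem pvTok_strip (s : String) : pvTok (PySem.Str.strip s) = pvTok s := by
  unfold pvTok
  rw [pv_str_strip_strip]

-- the tokens A computes from a text entry are B's tokens of the raw entry
theorem pvTok_text (e : List (String × String)) : pvTok (pvText e) = pvEntTok e :=
  pvTok_strip _

theorem pvTok_empty : pvTok "" = [] := by decide

-- the texts list built by A's first comprehension
theorem pv_texts_eq (seeds : List (List (String × String))) (acc : List String) :
    seeds.foldl (fun acc ent =>
      let t := pvText ent
      if t ≠ "" then acc ++ [t] else acc) acc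
    = acc ++ (seeds.map pvText).filter (fun t => t ≠ "") := by
  induction seeds generalizing acc with
  | nil => simp
  | cons e es ih =>
    simp only [List.foldl_cons, List.map_cons, List.filter_cons]
    by_cases h : pvText e ≠ ""
    · rw [ih]; simp [h]
    · rw [ih]; simp at h; simp [h]

theorem pv_mem_texts (seeds : List (List (String × String))) (text : String) :
    text ∈ pvTexts seeds ↔ text ≠ "" ∧ ∃ e ∈ seeds, pvText e = text := by
  rw [pvTexts, pv_texts_eq]
  simp only [List.nil_append, List.mem_filter, List.mem_map, decide_eq_true_eq]
  tauto

-- A's inner loop body for a fixed pair, as a proposition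
theorem pv_inner_iff (text other : String) (S : PySem.Set String) :
    ((if text == other then false
      else if (pvTok other).length ≠ 1 then false
      else PySem.Set.issubset (PySem.Set.ofList (pvTok other)) S) = true)
    ↔ (text ≠ other ∧ (pvTok other).length = 1 ∧
        PySem.Set.issubset (PySem.Set.ofList (pvTok other)) S = true) := by
  by_cases he : text = other
  · rw [if_pos (by rw [he]; exact beq_self_eq_true other)]
    exact iff_of_false Bool.false_ne_true (fun h => h.1 he)
  · rw [if_neg (fun hb => he (eq_of_beq hb))]
    by_cases hl : (pvTok other).length = 1
    · rw [if_neg (fun hk => hk hl)]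
      exact ⟨fun h => ⟨he, hl, h⟩, fun h => h.2.2⟩
    · rw [if_pos hl]
      exact iff_of_false Bool.false_ne_true (fun h => hl h.2.1)

-- A's outer loop body for a fixed text, as a proposition
theorem pv_body_iff (texts : List String) (text : String) :
    ((if (pvTok text).length < 2 then false
      else texts.any (fun other =>
          if text == other then false
          else if (pvTok other).length ≠ 1 then false
          else PySem.Set.issubset (PySem.Set.ofList (pvTok other))
            (PySem.Set.ofList (pvTok text)))) = true)
    ↔ (2 ≤ (pvTok text).length ∧ ∃ other ∈ texts, text ≠ other ∧
        (pvTok other).length = 1 ∧ ∀ w ∈ pvTok other, w ∈ pvTok text) := by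
  by_cases h : (pvTok text).length < 2
  · rw [if_pos h]
    exact iff_of_false Bool.false_ne_true (fun hh => by have := hh.1; omega)
  · rw [if_neg h, List.any_eq_true]
    constructor
    · rintro ⟨other, hmem, hcond⟩
      obtain ⟨hne, hl1, hsub⟩ := (pv_inner_iff text other _).mp hcond
      refine ⟨by omega, other, hmem, hne, hl1, ?_⟩
      intro w hw
      exact (PySem.Set.mem_ofList _ _).mp
        ((PySem.Set.issubset_iff _ _).mp hsub w ((PySem.Set.mem_ofList _ _).mpr hw))
    · rintro ⟨-, other, hmem, hne, hl1, hsub⟩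
      refine ⟨other, hmem, (pv_inner_iff text other _).mpr ⟨hne, hl1, ?_⟩⟩
      rw [PySem.Set.issubset_iff]
      intro x hx
      exact (PySem.Set.mem_ofList _ _).mpr (hsub x ((PySem.Set.mem_ofList _ _).mp hx))

-- characterization of A
theorem pv_A_iff (seeds : List (List (String × String))) :
    has_degenerate_merged_span_py seeds = true ↔
    ∃ e1 ∈ seeds, ∃ e2 ∈ seeds,
      2 ≤ (pvEntTok e1).length ∧ (pvEntTok e2).length = 1 ∧
      ∀ w ∈ pvEntTok e2, w ∈ pvEntTok e1 := by
  have hA : has_degenerate_merged_span_py seeds = (pvTexts seeds).any (fun text =>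
      if (pvTok text).length < 2 then false
      else (pvTexts seeds).any (fun other =>
          if text == other then false
          else if (pvTok other).length ≠ 1 then false
          else PySem.Set.issubset (PySem.Set.ofList (pvTok other))
            (PySem.Set.ofList (pvTok text)))) := rfl
  rw [hA, List.any_eq_true]
  constructor
  · rintro ⟨text, htm, hbody⟩
    obtain ⟨h2, other, hom, hne, h1, hsub⟩ := (pv_body_iff (pvTexts seeds) text).mp hbody
    obtain ⟨-, e1, he1, rfl⟩ := (pv_mem_texts seeds text).mp htm
    obtain ⟨-, e2, he2, rfl⟩ := (pv_mem_texts seeds other).mp hom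
    simp only [pvTok_text] at h2 h1 hsub
    exact ⟨e1, he1, e2, he2, h2, h1, hsub⟩
  · rintro ⟨e1, he1, e2, he2, h2, h1, hsub⟩
    have k1 := pvTok_text e1
    have k2 := pvTok_text e2
    have hne1 : pvText e1 ≠ "" := by
      intro h
      rw [h, pvTok_empty] at k1
      have := congrArg List.length k1
      simp at this
      omega
    have hne2 : pvText e2 ≠ "" := by
      intro h
      rw [h, pvTok_empty] at k2
      have := congrArg List.length k2
      simp at this
      omega
    have hdiff : pvText e1 ≠ pvText e2 := by
      intro h
      have heq : pvEntTok e1 = pvEntTok e2 := by rw [← k1, ← k2, h]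
      rw [heq] at h2
      omega
    have ha : 2 ≤ (pvTok (pvText e1)).length := by rw [k1]; exact h2
    have hb1 : (pvTok (pvText e2)).length = 1 := by rw [k2]; exact h1
    have hc : ∀ w ∈ pvTok (pvText e2), w ∈ pvTok (pvText e1) := by
      rw [k1, k2]; exact hsub
    have hmem1 : pvText e1 ∈ pvTexts seeds := (pv_mem_texts seeds _).mpr ⟨hne1, e1, he1, rfl⟩
    have hmem2 : pvText e2 ∈ pvTexts seeds := (pv_mem_texts seeds _).mpr ⟨hne2, e2, he2, rfl⟩
    have hb := (pv_body_iff (pvTexts seeds) (pvText e1)).mpr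
      ⟨ha, pvText e2, hmem2, hdiff, hb1, hc⟩
    exact ⟨pvText e1, hmem1, hb⟩

-- invariant of B's fold
theorem pv_B_fold (seeds : List (List (String × String))) (init : PySem.Set String × PySem.Set String) (w : String) :
    (w ∈ (seeds.foldl pvStepB init).1 ↔
      w ∈ init.1 ∨ ∃ e ∈ seeds, (pvEntTok e).length = 1 ∧ w ∈ pvEntTok e) ∧
    (w ∈ (seeds.foldl pvStepB init).2 ↔
      w ∈ init.2 ∨ ∃ e ∈ seeds, 2 ≤ (pvEntTok e).length ∧ w ∈ pvEntTok e) := by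
  induction seeds generalizing init with
  | nil => simp
  | cons e es ih =>
    rw [List.foldl_cons]
    have hstep := ih (pvStepB init e)
    rcases htk : pvEntTok e with _ | ⟨a, _ | ⟨b, t⟩⟩
    · have hs : pvStepB init e = init := by rw [pvStepB, htk]; rfl
      rw [hs] at hstep ⊢
      have hm1 : ((pvEntTok e).length = 1 ∧ w ∈ pvEntTok e) ↔ False := by
        rw [htk]
        exact ⟨fun h => List.not_mem_nil h.2, False.elim⟩
      have hm2 : (2 ≤ (pvEntTok e).length ∧ w ∈ pvEntTok e) ↔ False := by
        rw [htk]
        exact ⟨fun h => List.not_mem_nil h.2, False.elim⟩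
      refine ⟨?_, ?_⟩
      · rw [hstep.1, List.exists_mem_cons_iff, hm1, false_or]
      · rw [hstep.2, List.exists_mem_cons_iff, hm2, false_or]
    · have hs : pvStepB init e = (PySem.Set.add init.1 a, init.2) := by rw [pvStepB, htk]; rfl
      rw [hs] at hstep ⊢
      have hm1 : ((pvEntTok e).length = 1 ∧ w ∈ pvEntTok e) ↔ w = a := by
        rw [htk]
        simp only [List.length_singleton, List.mem_singleton, true_and]
      have hm2 : (2 ≤ (pvEntTok e).length ∧ w ∈ pvEntTok e) ↔ False := by
        rw [htk]
        simp only [List.length_singleton, List.mem_singleton]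
        exact ⟨fun h => by omega, False.elim⟩
      refine ⟨?_, ?_⟩
      · rw [hstep.1, PySem.Set.mem_add, List.exists_mem_cons_iff, hm1]
        exact or_assoc
      · rw [hstep.2, List.exists_mem_cons_iff, hm2, false_or]
    · have hs : pvStepB init e = (init.1, PySem.Set.update init.2 (a :: b :: t)) := by
        rw [pvStepB, htk]; rfl
      rw [hs] at hstep ⊢
      have hm1 : ((pvEntTok e).length = 1 ∧ w ∈ pvEntTok e) ↔ False := by
        rw [htk]
        simp only [List.length_cons]
        exact ⟨fun h => by omega, False.elim⟩
      have hm2 : (2 ≤ (pvEntTok e).length ∧ w ∈ pvEntTok e) ↔ w ∈ a :: b :: t := by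
        rw [htk]
        simp only [List.length_cons]
        exact ⟨fun h => h.2, fun h => ⟨by omega, h⟩⟩
      refine ⟨?_, ?_⟩
      · rw [hstep.1, List.exists_mem_cons_iff, hm1, false_or]
      · rw [hstep.2, PySem.Set.mem_update, List.exists_mem_cons_iff, hm2]
        exact or_assoc

-- characterization of B
theorem pv_B_iff (seeds : List (List (String × String))) :
    has_degenerate_merged_span_py_alt seeds = true ↔
    ∃ w, (∃ e ∈ seeds, (pvEntTok e).length = 1 ∧ w ∈ pvEntTok e) ∧
         (∃ e ∈ seeds, 2 ≤ (pvEntTok e).length ∧ w ∈ pvEntTok e) := by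
  have hB : has_degenerate_merged_span_py_alt seeds =
      !(PySem.Set.isdisjoint (seeds.foldl pvStepB (PySem.Set.empty, PySem.Set.empty)).1
        (seeds.foldl pvStepB (PySem.Set.empty, PySem.Set.empty)).2) := rfl
  rw [hB, Bool.not_eq_true']
  have hmem := fun w => pv_B_fold seeds (PySem.Set.empty, PySem.Set.empty) w
  have hemp : ∀ x : String, x ∉ (PySem.Set.empty : PySem.Set String) := fun x h =>
    List.not_mem_nil h
  constructor
  · intro hd
    have hnd : ¬ (PySem.Set.isdisjoint (seeds.foldl pvStepB (PySem.Set.empty, PySem.Set.empty)).1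
        (seeds.foldl pvStepB (PySem.Set.empty, PySem.Set.empty)).2 = true) := by
      rw [hd]; exact Bool.false_ne_true
    rw [PySem.Set.isdisjoint_iff] at hnd
    push Not at hnd
    obtain ⟨w, hw1, hw2⟩ := hnd
    refine ⟨w, ?_, ?_⟩
    · rcases (hmem w).1.mp hw1 with h | h
      · exact absurd h (hemp w)
      · exact h
    · rcases (hmem w).2.mp hw2 with h | h
      · exact absurd h (hemp w)
      · exact h
  · rintro ⟨w, h1, h2⟩
    have hw1 := (hmem w).1.mpr (Or.inr h1)
    have hw2 := (hmem w).2.mpr (Or.inr h2)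
    cases hd : PySem.Set.isdisjoint (seeds.foldl pvStepB (PySem.Set.empty, PySem.Set.empty)).1
        (seeds.foldl pvStepB (PySem.Set.empty, PySem.Set.empty)).2 with
    | false => rfl
    | true => exact absurd hw2 ((PySem.Set.isdisjoint_iff _ _).mp hd w hw1)

-- ===== VERDICT (by name: the statement is the Claim_ definition above) =====
theorem has_degenerate_merged_span_py_spec : Claim_equal_has_degenerate_merged_span_py := by
  intro seeds _
  unfold Spec_has_degenerate_merged_span_py
  rcases Bool.eq_false_or_eq_true (has_degenerate_merged_span_py_alt seeds) with hb | hb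
  · rw [hb]
    rcases (pv_B_iff seeds).mp hb with ⟨w, ⟨e2, he2, hlen2, hw2⟩, ⟨e1, he1, hlen1, hw1⟩⟩
    refine (pv_A_iff seeds).mpr ⟨e1, he1, e2, he2, hlen1, hlen2, ?_⟩
    have he : pvEntTok e2 = [w] := by
      cases h : pvEntTok e2 with
      | nil => rw [h] at hlen2; simp at hlen2
      | cons a t =>
        cases t with
        | nil =>
          rw [h] at hw2
          simp at hw2
          rw [hw2]
        | cons b t2 => rw [h] at hlen2; simp at hlen2
    intro x hx
    rw [he] at hx
    simp at hx
    rw [hx]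
    exact hw1
  · rw [hb]
    cases hA : has_degenerate_merged_span_py seeds with
    | false => rfl
    | true =>
      exfalso
      rcases (pv_A_iff seeds).mp hA with ⟨e1, he1, e2, he2, h1, h2, hsub⟩
      obtain ⟨w, hw⟩ : ∃ w, w ∈ pvEntTok e2 := by
        cases h : pvEntTok e2 with
        | nil => rw [h] at h2; simp at h2
        | cons a t => exact ⟨a, List.mem_cons_self⟩
      have hbt : has_degenerate_merged_span_py_alt seeds = true :=
        (pv_B_iff seeds).mpr ⟨w, ⟨e2, he2, h2, hw⟩, ⟨e1, he1, h1, hsub w hw⟩⟩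
      rw [hb] at hbt
      exact Bool.false_ne_true hbt
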